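-- pv_equiv track=rewrite | github.com/fhrzic/CTBodyPartRecognition | UsefullScripts/3D_Conversion/3DWithoutHistogramReduction/Utils/GenerateNPY.py | divide_list
-- ===== SOURCE A (Python) =====
-- def divide_list(input_list:list, number_of_sublists: int)->list:
--     """
--     Divide list in equal sublists
--
--     Args:
--         * input_list, list, list which must be divede into chunks
--         * number_of_sublists, int, number represetning number of chunks
--
--     Returns:
--         * sublists, list, list of sublist
--     """
--     # Calculate the number of elements per sublist
--     _elements_per_sublist = len(input_list) // number_of_sublists
--     _remainder = len(input_list) % number_of_sublists
--
--     # Initialize starting index and result list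
--     _start = 0
--     _sublists = []
--
--     # Iterate over each sublist
--     for _i in range(number_of_sublists):
--         # Calculate the sublist size considering the remainder
--         _sublist_size = _elements_per_sublist + (1 if _i < _remainder else 0)
--
--         # Append sublist to the result list
--         _sublists.append(input_list[_start:_start+_sublist_size])
--
--         # Update the starting index for the next sublist
--         _start += _sublist_size
--
--     return _sublists
-- ===== SOURCE B (Python) =====
-- def divide_list(input_list: list, number_of_sublists: int) -> list:
--     """Iterator-draining re-implementation: compute all chunk sizes first,
--     then drain a single iterator once; remainder still goes to the first chunks."""
--     q, r = divmod(len(input_list), number_of_sublists)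
--     it = iter(input_list)
--     return [[next(it) for _ in range(q + (1 if i < r else 0))]
--             for i in range(number_of_sublists)]
-- ===== Notes on version B (the rewrite author's own statement) =====
-- stated objective: alternative
-- what changed: Replaces the index-accumulator slicing loop (start index + input_list[start:start+size] per chunk) by computing the size list up front and draining a single iterator once, so no start index and no slicing are used.
import Mathlib
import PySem

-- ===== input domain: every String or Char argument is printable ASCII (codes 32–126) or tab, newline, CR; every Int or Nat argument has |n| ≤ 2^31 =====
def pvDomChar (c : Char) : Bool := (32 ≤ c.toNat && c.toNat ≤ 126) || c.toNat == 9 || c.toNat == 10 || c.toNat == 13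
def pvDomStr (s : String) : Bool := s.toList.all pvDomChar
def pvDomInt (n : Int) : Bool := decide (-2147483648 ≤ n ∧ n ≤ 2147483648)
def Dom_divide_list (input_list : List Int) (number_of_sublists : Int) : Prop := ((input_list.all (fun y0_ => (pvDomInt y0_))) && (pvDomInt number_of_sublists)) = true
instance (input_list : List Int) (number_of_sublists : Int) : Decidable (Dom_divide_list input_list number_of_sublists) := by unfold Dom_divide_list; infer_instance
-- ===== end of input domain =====

-- B replaces A's index-accumulator slicing loop by a precomputed size list drained in one pass (alternative decomposition, same cost).


-- ===== PORT A =====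
def divide_list (input_list : List Int) (number_of_sublists : Int) : List (List Int) :=
  let eps := PySem.Int.floordiv (input_list.length : Int) number_of_sublists
  let rem := PySem.Int.mod (input_list.length : Int) number_of_sublists
  ((PySem.List.pyRange 0 number_of_sublists 1).foldl
    (fun (st : Int × List (List Int)) i =>
      let size := eps + (if i < rem then (1:Int) else 0)
      (st.1 + size, st.2 ++ [PySem.List.slice input_list (some st.1) (some (st.1 + size))]))
    (0, [])).2

-- ===== PORT B =====
-- '[next(it) for _ in range(s)]' drains s elements from the iterator: take s, continue on drop s.
def pvDrain (xs : List Int) : List Int → List (List Int)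
  | [] => []
  | s :: rest => xs.take s.toNat :: pvDrain (xs.drop s.toNat) rest

def divide_list_alt (input_list : List Int) (number_of_sublists : Int) : List (List Int) :=
  let q := PySem.Int.floordiv (input_list.length : Int) number_of_sublists
  let r := PySem.Int.mod (input_list.length : Int) number_of_sublists
  let sizes := (PySem.List.pyRange 0 number_of_sublists 1).map
    (fun i => q + (if i < r then (1:Int) else 0))
  pvDrain input_list sizes

-- ===== PRECONDITION & SPEC =====
-- Python raises ZeroDivisionError (in both A and B) when number_of_sublists == 0.
def Pre_divide_list (input_list : List Int) (number_of_sublists : Int) : Prop := number_of_sublists ≠ 0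
instance (input_list : List Int) (number_of_sublists : Int) : Decidable (Pre_divide_list input_list number_of_sublists) := by unfold Pre_divide_list; infer_instance
def pvWitness_divide_list : List Int × Int := ([1, 2, 3, 4, 5], 2)

def Spec_divide_list (input_list : List Int) (number_of_sublists : Int) (out : List (List Int)) : Prop := out = divide_list_alt input_list number_of_sublists
instance (input_list : List Int) (number_of_sublists : Int) (out : List (List Int)) : Decidable (Spec_divide_list input_list number_of_sublists out) := by unfold Spec_divide_list; infer_instance

-- ===== CLAIM (what is proved, stated in full; the proofs are below) =====
def Claim_equal_divide_list : Prop := ∀ (input_list : List Int) (number_of_sublists : Int), Dom_divide_list input_list number_of_sublists → Pre_divide_list input_list number_of_sublists → Spec_divide_list input_list number_of_sublists (divide_list input_list number_of_sublists)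

-- ===== LEMMAS AND PROOFS =====
-- A's slicing loop with running start index equals draining the suffix after `start` by the mapped sizes.
theorem foldl_slice_eq_drain (xs : List Int) (size : Int → Int) :
    ∀ (l : List Int) (start : Int) (acc : List (List Int)),
      0 ≤ start → (∀ i ∈ l, 0 ≤ size i) →
      (l.foldl
        (fun (st : Int × List (List Int)) i =>
          (st.1 + size i, st.2 ++ [PySem.List.slice xs (some st.1) (some (st.1 + size i))]))
        (start, acc)).2
      = acc ++ pvDrain (xs.drop start.toNat) (l.map size)
  | [], start, acc, _, _ => by simp [pvDrain]
  | i :: l, start, acc, hs, hsz => by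
    have hi : 0 ≤ size i := hsz i (List.mem_cons_self ..)
    have hrec := foldl_slice_eq_drain xs size l (start + size i) (acc ++ [PySem.List.slice xs (some start) (some (start + size i))]) (by omega) (fun j hj => hsz j (List.mem_cons_of_mem _ hj))
    simp only [List.foldl_cons, List.map_cons, pvDrain]
    rw [hrec, PySem.List.slice_toNat xs hs (by omega)]
    have h1 : (start + size i).toNat - start.toNat = (size i).toNat := by omega
    have h2 : (xs.drop start.toNat).drop (size i).toNat = xs.drop (start + size i).toNat := by
      rw [List.drop_drop]; congr 1; omega
    rw [h1, h2]
    simp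

theorem divide_list_spec : Claim_equal_divide_list := by
  intro xs k _ hk
  unfold Spec_divide_list divide_list divide_list_alt
  rcases lt_or_gt_of_ne hk with hneg | hpos
  · rw [PySem.List.pyRange_one_eq_nil (by omega)]
    simp [pvDrain]
  · have hq : 0 ≤ PySem.Int.floordiv (xs.length : Int) k := by
      rw [PySem.Int.floordiv_eq_ediv_of_pos hpos]
      exact Int.ediv_nonneg (by positivity) hpos.le
    rw [foldl_slice_eq_drain xs _ _ 0 [] le_rfl
        (fun i _ => by split <;> omega)]
    simp
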